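-- pv_equiv track=rewrite | github.com/RalucaIonita/TextClasification | project.py | get_bow
-- ===== SOURCE A (Python) =====
-- def get_bow(text, list_of_words):
-- 	counter = dict()
-- 	words = set(list_of_words)
-- 	for word in words:
-- 		counter[word] = 0
-- 	for word in text:
-- 		if word in words:
-- 			counter[word] += 1
-- 	return counter
-- ===== SOURCE B (Python) =====
-- def get_bow(text, list_of_words):
--     return {w: text.count(w) for w in set(list_of_words)}
-- ===== Notes on version B (the rewrite author's own statement) =====
-- stated objective: simpler
-- what changed: Replaces the zero-initialisation loop plus running-counter loop over text with a one-line dict comprehension that counts each distinct word independently via text.count.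
import Mathlib
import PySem

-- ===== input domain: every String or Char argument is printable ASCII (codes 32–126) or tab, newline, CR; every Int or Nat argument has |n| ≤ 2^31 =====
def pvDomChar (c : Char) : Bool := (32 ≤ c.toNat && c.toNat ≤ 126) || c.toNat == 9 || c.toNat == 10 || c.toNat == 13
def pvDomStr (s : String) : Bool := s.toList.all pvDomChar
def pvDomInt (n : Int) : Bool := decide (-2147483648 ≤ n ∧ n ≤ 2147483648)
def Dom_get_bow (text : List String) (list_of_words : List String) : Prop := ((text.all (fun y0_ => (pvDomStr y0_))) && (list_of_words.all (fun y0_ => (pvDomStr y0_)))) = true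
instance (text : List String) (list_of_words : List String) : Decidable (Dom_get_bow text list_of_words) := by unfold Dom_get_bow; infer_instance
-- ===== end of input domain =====

-- B: replaces the zero-init loop + running-counter loop with a per-distinct-word direct count of text (simpler, same result; not faster on large inputs).
-- ===== PORT A =====
-- returned dict rendered as its items list; set(list_of_words) iterated in first-occurrence order
def get_bow (text : List String) (list_of_words : List String) : List (String × Int) :=
  let words : PySem.Set String := PySem.Set.ofList list_of_words
  let counter := words.foldl (fun d w => d.insert w (0 : Int)) PySem.Dict.empty
  let counter := text.foldl (fun d w => if PySem.Set.contains words w then d.modify w 0 (· + 1) else d) counter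
  counter.items

-- ===== PORT B =====
def get_bow_alt (text : List String) (list_of_words : List String) : List (String × Int) :=
  (PySem.Set.ofList list_of_words).map (fun w => (w, (PySem.List.count text w : Int)))

-- ===== PRECONDITION & SPEC =====
def Spec_get_bow (text : List String) (list_of_words : List String) (out : List (String × Int)) : Prop := out = get_bow_alt text list_of_words
instance (text : List String) (list_of_words : List String) (out : List (String × Int)) : Decidable (Spec_get_bow text list_of_words out) := by unfold Spec_get_bow; infer_instance

-- ===== CLAIM (what is proved, stated in full; the proofs are below) =====
def Claim_equal_get_bow : Prop := ∀ (text : List String) (list_of_words : List String), Dom_get_bow text list_of_words → Spec_get_bow text list_of_words (get_bow text list_of_words)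

-- ===== LEMMAS AND PROOFS =====

theorem foldl_if_modify_eq_filter (text : List String) (p : String → Bool)
    (d : PySem.Dict String Int) :
    text.foldl (fun d w => if p w then d.modify w 0 (· + 1) else d) d =
      (text.filter p).foldl (fun d w => d.modify w (0 : Int) (· + 1)) d := by
  induction text generalizing d with
  | nil => rfl
  | cons x xs ih =>
    by_cases h : p x = true
    · simp [List.foldl, h, ih]
    · simp at h
      simp [List.foldl, h, ih]

theorem init_items (words : List String) (hnd : words.Nodup) :
    (words.foldl (fun d w => d.insert w (0 : Int)) PySem.Dict.empty).items =
      words.map (fun w => (w, (0 : Int))) := by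
  have := PySem.Dict.items_foldl_insert_fresh (l := words) (k := id)
    (v := fun _ => (0 : Int)) (d := PySem.Dict.empty)
    (by intro a _; exact PySem.Dict.contains_empty a) (by simpa using hnd)
  simpa using this

-- ===== VERDICT (by name: the statement is the Claim_ definition above) =====
theorem get_bow_spec : Claim_equal_get_bow := by
  intro text lws _
  unfold Spec_get_bow
  show (List.foldl
      (fun d w => if (PySem.Set.ofList lws).contains w then d.modify w 0 (· + 1) else d)
      (List.foldl (fun d w => d.insert w (0 : Int)) PySem.Dict.empty (PySem.Set.ofList lws))
      text).items =
    (PySem.Set.ofList lws).map (fun w => (w, (PySem.List.count text w : Int)))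
  set words := PySem.Set.ofList lws with hw
  have hnd : words.Nodup := PySem.Set.nodup_ofList lws
  set d0 := words.foldl (fun d w => d.insert w (0 : Int)) PySem.Dict.empty with hd0
  have hitems0 : d0.items = words.map (fun w => (w, (0 : Int))) := init_items words hnd
  have hkeys0 : d0.keys = words := by
    simp [PySem.Dict.keys, hitems0, Function.comp_def]
  rw [foldl_if_modify_eq_filter]
  set filt := text.filter (fun w => PySem.Set.contains words w) with hfilt
  set dfin := filt.foldl (fun d w => d.modify w (0 : Int) (· + 1)) d0 with hdfin
  have hkeys : dfin.keys = words := by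
    rw [hdfin, PySem.Dict.keys_foldl_modify, hkeys0]
    rw [PySem.Set.update_eq_append_filter]
    have hnil : (PySem.Set.ofList filt).filter
        (fun y => !(PySem.Set.contains words y)) = [] := by
      apply List.filter_eq_nil_iff.mpr
      intro a ha
      have ha' : a ∈ filt := (PySem.Set.mem_ofList filt a).mp ha
      have hca := List.of_mem_filter ha'
      simp only [Bool.not_eq_true']
      simpa using hca
    rw [hnil, List.append_nil]
  have hndk : dfin.keys.Nodup := by rw [hkeys]; exact hnd
  rw [PySem.Dict.items_eq_map_keys dfin hndk 0, hkeys]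
  apply List.map_congr_left
  intro w hwmem
  have hget0 : d0.getD w 0 = 0 := by
    apply PySem.Dict.getD_of_mem_items
    · rw [hitems0]; exact List.mem_map.mpr ⟨w, hwmem, rfl⟩
    · rw [hkeys0]; exact hnd
  have hc : PySem.Set.contains words w = true := (PySem.Set.contains_iff words w).mpr hwmem
  rw [hdfin, PySem.Dict.getD_foldl_modify_add_one, hget0, hfilt]
  have hcf : List.count w (List.filter (fun w => decide (w ∈ words)) text) =
      List.count w text := List.count_filter (by simpa using hwmem)
  simp [PySem.List.count_eq, hcf]
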